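-- pv_equiv track=rewrite | github.com/vctfence/scrapbee | helper/scrapyard/storage_sync.py | tree_sort_database
-- ===== SOURCE A (Python) =====
-- def tree_sort_database(nodes):
--     items = nodes.items()
--     children = dict()
--     roots = []
--
--     for uuid, n in items:
--         parent_uuid = n.get("parent", None)
--         if parent_uuid is None:
--             roots.append(n)
--         else:
--             if parent_uuid in children:
--                 children[parent_uuid].append(uuid)
--             else:
--                 children[parent_uuid] = [uuid]
--
--     def get_subtree(p, acc=[]):
--         children_uuids = children.get(p["uuid"], None)
--
--         if children_uuids:
--             for uuid in children_uuids:
--                 node = nodes[uuid]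
--                 acc.append(node)
--                 get_subtree(node, acc)
--
--         return acc
--
--     result = roots[:]
--
--     for r in roots:
--         result += get_subtree(r, [])
--
--     return result
-- ===== SOURCE B (Python) =====
-- def tree_sort_database(nodes):
--     children = {}
--     roots = []
--
--     for uuid, n in nodes.items():
--         parent_uuid = n.get("parent")
--         if parent_uuid is None:
--             roots.append(n)
--         else:
--             children.setdefault(parent_uuid, []).append(uuid)
--
--     result = roots[:]
--
--     for r in roots:
--         stack = list(reversed(children.get(r["uuid"], [])))
--         while stack:
--             uuid = stack.pop()
--             node = nodes[uuid]
--             result.append(node)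
--             stack.extend(reversed(children.get(node["uuid"], [])))
--
--     return result
-- ===== Notes on version B (the rewrite author's own statement) =====
-- stated objective: alternative
-- what changed: The recursive get_subtree helper (nested closure threading an accumulator) is replaced by an explicit stack-based iterative DFS per root: pop a uuid, append its node, push its children reversed; the children-index/roots build loop is kept one-pass (using setdefault).
import Mathlib
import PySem

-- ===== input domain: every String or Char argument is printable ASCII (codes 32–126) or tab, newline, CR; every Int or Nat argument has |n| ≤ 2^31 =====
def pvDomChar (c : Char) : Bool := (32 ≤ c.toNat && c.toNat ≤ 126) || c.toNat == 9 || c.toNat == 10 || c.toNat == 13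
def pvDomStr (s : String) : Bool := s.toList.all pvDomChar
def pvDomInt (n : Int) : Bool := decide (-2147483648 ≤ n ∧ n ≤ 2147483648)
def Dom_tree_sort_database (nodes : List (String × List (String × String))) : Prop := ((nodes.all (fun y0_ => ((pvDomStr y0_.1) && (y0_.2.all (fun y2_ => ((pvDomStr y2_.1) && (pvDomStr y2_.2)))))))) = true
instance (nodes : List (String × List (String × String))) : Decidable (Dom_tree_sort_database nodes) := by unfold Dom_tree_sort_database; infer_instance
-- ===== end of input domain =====

-- B replaces A's recursive `get_subtree` helper by an explicit stack-based DFS loop (same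
-- children-index build, same preorder output); objective: alternative decomposition, not speed.

-- ===== PORT A =====

-- one step of A's first loop: classify a (uuid, n) pair into the children index or the roots list
def pvStepA (cr : PySem.Dict String (List String) × List (List (String × String)))
    (kn : String × List (String × String)) :
    PySem.Dict String (List String) × List (List (String × String)) :=
  match PySem.Dict.get? (PySem.Dict.mk kn.2) "parent" with
  | none => (cr.1, cr.2 ++ [kn.2])
  | some pu =>
    match PySem.Dict.get? cr.1 pu with
    | some l => (PySem.Dict.insert cr.1 pu (l ++ [kn.1]), cr.2)
    | none => (PySem.Dict.insert cr.1 pu [kn.1], cr.2)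

-- A's recursive `get_subtree` (fuel bounds the recursion depth; under Pre_ the depth is
-- at most nodes.length, so the fuel nodes.length+1 given below is never exhausted)
mutual
def getSubtreeA (nodes : List (String × List (String × String)))
    (children : PySem.Dict String (List String)) :
    Nat → List (String × String) → List (List (String × String)) → List (List (String × String))
  | 0, _, acc => acc
  | f+1, p, acc =>
    match PySem.Dict.get? (PySem.Dict.mk p) "uuid" with
    | none => acc   -- Python raises KeyError here; such inputs are outside Pre_
    | some u =>
      match PySem.Dict.get? children u with
      | none => acc
      | some cs => if cs.isEmpty then acc else goA nodes children f cs acc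
termination_by f _ _ => (f, 0, 0)

-- the `for uuid in children_uuids` loop inside get_subtree
def goA (nodes : List (String × List (String × String)))
    (children : PySem.Dict String (List String)) :
    Nat → List String → List (List (String × String)) → List (List (String × String))
  | _, [], acc => acc
  | f, c :: cs, acc =>
    match PySem.Dict.get? (PySem.Dict.mk nodes) c with
    | none => acc   -- Python would raise KeyError; unreachable: children holds keys of nodes
    | some node => goA nodes children f cs (getSubtreeA nodes children f node (acc ++ [node]))
termination_by f cs _ => (f, 1, cs.length)
end

def tree_sort_database (nodes : List (String × List (String × String))) :
    List (List (String × String)) :=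
  let cr := nodes.foldl pvStepA (PySem.Dict.empty, [])
  cr.2.foldl (fun result r => result ++ getSubtreeA nodes cr.1 (nodes.length + 1) r []) cr.2

-- ===== PORT B =====

-- one step of B's first loop (children.setdefault(parent_uuid, []).append(uuid))
def pvStepB (cr : PySem.Dict String (List String) × List (List (String × String)))
    (kn : String × List (String × String)) :
    PySem.Dict String (List String) × List (List (String × String)) :=
  match PySem.Dict.get? (PySem.Dict.mk kn.2) "parent" with
  | none => (cr.1, cr.2 ++ [kn.2])
  | some pu => (PySem.Dict.insert cr.1 pu (PySem.Dict.getD cr.1 pu [] ++ [kn.1]), cr.2)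

-- B's `while stack` DFS loop.  The Lean list is the Python stack reversed (head = top of
-- stack), so Python's push of reversed(children) is a plain prepend here and pop() is the
-- head.  Fuel bounds the number of pops; the ample value passed below is never exhausted
-- under Pre_ (the loop stops by itself when the stack empties).
def loopB (nodes : List (String × List (String × String)))
    (children : PySem.Dict String (List String)) :
    Nat → List String → List (List (String × String)) → List (List (String × String))
  | 0, _, res => res
  | _+1, [], res => res
  | f+1, c :: stack, res =>
    match PySem.Dict.get? (PySem.Dict.mk nodes) c with
    | none => res   -- Python would raise KeyError; unreachable: the stack holds keys of nodes
    | some node =>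
      match PySem.Dict.get? (PySem.Dict.mk node) "uuid" with
      | none => res   -- Python raises KeyError here; such inputs are outside Pre_
      | some u => loopB nodes children f (PySem.Dict.getD children u [] ++ stack) (res ++ [node])

def tree_sort_database_alt (nodes : List (String × List (String × String))) :
    List (List (String × String)) :=
  let cr := nodes.foldl pvStepB (PySem.Dict.empty, [])
  cr.2.foldl (fun result r =>
    match PySem.Dict.get? (PySem.Dict.mk r) "uuid" with
    | none => result   -- Python raises KeyError here; such inputs are outside Pre_
    | some u =>
      loopB nodes cr.1 ((nodes.length + 1) ^ (nodes.length + 1))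
        (PySem.Dict.getD cr.1 u []) result) cr.2

-- ===== PRECONDITION & SPEC =====

-- the "parent" field of a node (dict lookup, first match)
def parentF (n : List (String × String)) : Option String :=
  PySem.Dict.get? (PySem.Dict.mk n) "parent"

-- the "uuid" field of a node
def uidOf (n : List (String × String)) : Option String :=
  PySem.Dict.get? (PySem.Dict.mk n) "uuid"

-- pvGood l r w: every node whose "parent" field equals w carries a "uuid" field and is
-- pvGood at r-1 — i.e. the subtree of nodes hanging (by parent/uuid value links) under the
-- uuid value w has height < r and a "uuid" field at every node.
def pvGood (l : List (String × List (String × String))) : Nat → String → Bool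
  | 0, _ => false
  | r+1, w => (l.filter (fun kn => parentF kn.2 == some w)).all
      (fun kn => match uidOf kn.2 with
        | some w2 => pvGood l r w2
        | none => false)

-- Pre_ admits databases with distinct keys in which every root (node without a "parent"
-- field) carries a "uuid" field and the parent/uuid-value links hanging under it form a
-- finite-height forest with a "uuid" field at every node.  This excludes exactly the inputs
-- on which A raises: KeyError on a visited node without "uuid", RecursionError on a parent
-- link cycle reachable from a root.
def Pre_tree_sort_database (nodes : List (String × List (String × String))) : Prop :=
  (nodes.map Prod.fst).Nodup ∧
  (nodes.all (fun kn => match parentF kn.2 with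
    | some _ => true
    | none => match uidOf kn.2 with
      | some w => pvGood nodes nodes.length w
      | none => false)) = true
instance (nodes : List (String × List (String × String))) : Decidable (Pre_tree_sort_database nodes) := by
  unfold Pre_tree_sort_database; infer_instance

def pvWitness_tree_sort_database : (List (String × List (String × String))) :=
  [("d", [("uuid", "d"), ("parent", "b")]), ("a", [("uuid", "a")]),
   ("b", [("uuid", "b"), ("parent", "a")]), ("c", [("uuid", "c"), ("parent", "a")])]

def Spec_tree_sort_database (nodes : List (String × List (String × String))) (out : List (List (String × String))) : Prop := out = tree_sort_database_alt nodes
instance (nodes : List (String × List (String × String))) (out : List (List (String × String))) : Decidable (Spec_tree_sort_database nodes out) := by unfold Spec_tree_sort_database; infer_instance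

-- ===== CLAIM (what is proved, stated in full; the proofs are below) =====
def Claim_equal_tree_sort_database : Prop := ∀ (nodes : List (String × List (String × String))), Dom_tree_sort_database nodes → Pre_tree_sort_database nodes → Spec_tree_sort_database nodes (tree_sort_database nodes)

-- ===== LEMMAS AND PROOFS =====

-- abbreviations for the structures both builds produce
def childD (l : List (String × List (String × String))) : PySem.Dict String (List String) :=
  (l.foldl pvStepA (PySem.Dict.empty, [])).1

def rootsA (l : List (String × List (String × String))) : List (List (String × String)) :=
  (l.foldl pvStepA (PySem.Dict.empty, [])).2

def childList (l : List (String × List (String × String))) (u : String) : List String :=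
  PySem.Dict.getD (childD l) u []

def lk (l : List (String × List (String × String))) (c : String) :
    Option (List (String × String)) :=
  PySem.Dict.get? (PySem.Dict.mk l) c

theorem flatMap_congr_mem {α β : Type} (cs : List α) (f g : α → List β)
    (h : ∀ c ∈ cs, f c = g c) : cs.flatMap f = cs.flatMap g := by
  induction cs with
  | nil => rfl
  | cons c cs ih => simp only [List.flatMap_cons, h c (by simp), ih (fun x hx => h x (by simp [hx]))]

theorem stepAB (cr : PySem.Dict String (List String) × List (List (String × String)))
    (kn : String × List (String × String)) : pvStepA cr kn = pvStepB cr kn := by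
  unfold pvStepA pvStepB
  cases hp : PySem.Dict.get? (PySem.Dict.mk kn.2) "parent" with
  | none => rfl
  | some pu =>
    cases hc : PySem.Dict.get? cr.1 pu with
    | none => simp [hc, PySem.Dict.getD_eq_get?_getD]
    | some ll => simp [hc, PySem.Dict.getD_eq_get?_getD]

theorem foldAB (l : List (String × List (String × String))) :
    l.foldl pvStepA (PySem.Dict.empty, []) = l.foldl pvStepB (PySem.Dict.empty, []) := by
  have h : pvStepA = pvStepB := funext fun cr => funext fun kn => stepAB cr kn
  rw [h]

theorem stepA_fst (cr : PySem.Dict String (List String) × List (List (String × String)))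
    (kn : String × List (String × String)) :
    (pvStepA cr kn).1 = match parentF kn.2 with
      | none => cr.1
      | some pu => PySem.Dict.insert cr.1 pu (PySem.Dict.getD cr.1 pu [] ++ [kn.1]) := by
  rw [stepAB]; unfold pvStepB parentF
  cases hp : PySem.Dict.get? (PySem.Dict.mk kn.2) "parent" <;> rfl

theorem rootsA_aux (l : List (String × List (String × String)))
    (init : PySem.Dict String (List String) × List (List (String × String))) :
    (l.foldl pvStepA init).2
      = init.2 ++ (l.filter (fun kn => (parentF kn.2).isNone)).map Prod.snd := by
  induction l generalizing init with
  | nil => simp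
  | cons kn l ih =>
    rw [List.foldl_cons, ih]
    have h2 : (pvStepA init kn).2 = match parentF kn.2 with
        | none => init.2 ++ [kn.2] | some _ => init.2 := by
      rw [stepAB]; unfold pvStepB parentF
      cases PySem.Dict.get? (PySem.Dict.mk kn.2) "parent" <;> rfl
    rw [h2]
    cases hp : parentF kn.2 <;> simp [hp]

theorem rootsA_spec (l : List (String × List (String × String))) :
    rootsA l = (l.filter (fun kn => (parentF kn.2).isNone)).map Prod.snd := by
  unfold rootsA; rw [rootsA_aux]; rfl

theorem childList_aux (l : List (String × List (String × String)))
    (init : PySem.Dict String (List String) × List (List (String × String))) (u : String) :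
    PySem.Dict.getD (l.foldl pvStepA init).1 u []
      = PySem.Dict.getD init.1 u []
        ++ (l.filter (fun kn => decide (parentF kn.2 = some u))).map Prod.fst := by
  induction l generalizing init with
  | nil => simp
  | cons kn l ih =>
    rw [List.foldl_cons, ih]
    rw [stepA_fst init kn]
    cases hp : parentF kn.2 with
    | none => simp [hp]
    | some pu =>
      by_cases hpu : u = pu
      · subst hpu
        simp [hp]
      · simp [hp, PySem.Dict.getD_insert, hpu, Ne.symm hpu]

theorem childList_spec (l : List (String × List (String × String))) (u : String) :
    childList l u
      = (l.filter (fun kn => decide (parentF kn.2 = some u))).map Prod.fst := by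
  unfold childList childD; rw [childList_aux]; simp [PySem.Dict.getD_empty]

theorem length_childList (l : List (String × List (String × String))) (u : String) :
    (childList l u).length ≤ l.length := by
  rw [childList_spec]
  simpa using List.length_filter_le _ l

theorem mem_childList (l : List (String × List (String × String))) (u c : String) :
    c ∈ childList l u ↔ ∃ n, (c, n) ∈ l ∧ parentF n = some u := by
  rw [childList_spec]
  constructor
  · intro h
    rcases List.mem_map.mp h with ⟨kn, hkn, hfst⟩
    rcases List.mem_filter.mp hkn with ⟨hmem, hdec⟩
    subst hfst
    exact ⟨kn.2, by simpa using hmem, of_decide_eq_true hdec⟩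
  · rintro ⟨n, hmem, hp⟩
    exact List.mem_map.mpr ⟨(c, n), List.mem_filter.mpr ⟨hmem, decide_eq_true hp⟩, rfl⟩

theorem lk_mem (l : List (String × List (String × String)))
    (hk : (l.map Prod.fst).Nodup) {c : String} {n : List (String × String)}
    (h : (c, n) ∈ l) : lk l c = some n := by
  unfold lk
  exact PySem.Dict.get?_of_mem_items (d := PySem.Dict.mk l) h hk

theorem mem_of_lk (l : List (String × List (String × String))) {c : String}
    {n : List (String × String)} (h : lk l c = some n) : (c, n) ∈ l :=
  PySem.Dict.mem_items_of_get?_eq_some (d := PySem.Dict.mk l) h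

-- the ideal preorder listing of the descendants hanging under uuid-value w (fueled)
def preV (l : List (String × List (String × String))) :
    Nat → String → List (List (String × String))
  | 0, _ => []
  | f+1, w => (childList l w).flatMap (fun c =>
      match lk l c with
      | some m => m :: (match uidOf m with
          | some w2 => preV l f w2
          | none => [])
      | none => [])

def pvGV (l : List (String × List (String × String))) (f : Nat) (c : String) :
    List (List (String × String)) :=
  match lk l c with
  | some m => m :: (match uidOf m with
      | some w2 => preV l f w2
      | none => [])
  | none => []

theorem preV_succ (l : List (String × List (String × String))) (f : Nat) (w : String) :
    preV l (f+1) w = (childList l w).flatMap (pvGV l f) := rfl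

-- a node hanging under a pvGood value has a uuid and is pvGood one level lower
theorem goodChildren (l : List (String × List (String × String))) {r : Nat} {w : String}
    (hg : pvGood l (r+1) w = true) {c : String} {m : List (String × String)}
    (hcm : (c, m) ∈ l) (hp : parentF m = some w) :
    ∃ w2, uidOf m = some w2 ∧ pvGood l r w2 = true := by
  rw [pvGood] at hg
  have hmem : (c, m) ∈ l.filter (fun kn => parentF kn.2 == some w) :=
    List.mem_filter.mpr ⟨hcm, by simp [hp]⟩
  have h := (List.all_eq_true.mp hg) (c, m) hmem
  simp only at h
  cases hu : uidOf m with
  | none => rw [hu] at h; exact absurd h (by simp)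
  | some w2 => rw [hu] at h; exact ⟨w2, rfl, h⟩

-- pvGood is monotone in the fuel
theorem pvGood_mono (l : List (String × List (String × String))) :
    ∀ (r : Nat) (w : String), pvGood l r w = true → pvGood l (r+1) w = true := by
  intro r
  induction r with
  | zero => intro w h; rw [pvGood] at h; exact absurd h (by simp)
  | succ r ih =>
    intro w h
    rw [pvGood] at h ⊢
    refine List.all_eq_true.mpr (fun kn hkn => ?_)
    have h2 := (List.all_eq_true.mp h) kn hkn
    simp only at h2 ⊢
    cases hu : uidOf kn.2 with
    | none => rw [hu] at h2; exact absurd h2 (by simp)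
    | some w2 => rw [hu] at h2; exact ih w2 h2

theorem pvGood_le (l : List (String × List (String × String))) {r s : Nat} {w : String}
    (hrs : r ≤ s) (h : pvGood l r w = true) : pvGood l s w = true := by
  induction s with
  | zero => have : r = 0 := Nat.le_zero.mp hrs; rw [this] at h; exact h
  | succ s ih =>
    rcases Nat.lt_or_ge r (s+1) with hlt | hge
    · exact pvGood_mono l s w (ih (by omega))
    · have : r = s+1 := by omega
      rw [this] at h; exact h

-- stability: once the fuel covers the pvGood bound, preV is constant
theorem preV_stab (l : List (String × List (String × String)))
    (hk : (l.map Prod.fst).Nodup) :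
    ∀ (r : Nat) (w : String) (f : Nat), pvGood l r w = true → r ≤ f →
      preV l f w = preV l (f+1) w := by
  intro r
  induction r with
  | zero => intro w f h _; rw [pvGood] at h; exact absurd h (by simp)
  | succ r ih =>
    intro w f h hrf
    obtain ⟨g, rfl⟩ : ∃ g, f = g + 1 := ⟨f - 1, by omega⟩
    rw [preV_succ, preV_succ]
    refine flatMap_congr_mem _ _ _ (fun c hc => ?_)
    rcases (mem_childList l w c).mp hc with ⟨m, hm, hp⟩
    have hlkc : lk l c = some m := lk_mem l hk hm
    rcases goodChildren l h hm hp with ⟨w2, hu, hg2⟩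
    unfold pvGV
    rw [hlkc]
    dsimp only
    rw [hu]
    dsimp only
    rw [ih w2 g hg2 (by omega)]

-- a node without a "uuid" field makes A's recursion return the accumulator at once
theorem getSubtreeA_uuid_none (l : List (String × List (String × String)))
    (d : PySem.Dict String (List String)) {m : List (String × String)}
    (h : PySem.Dict.get? (PySem.Dict.mk m) "uuid" = none)
    (f : Nat) (acc : List (List (String × String))) :
    getSubtreeA l d f m acc = acc := by
  cases f with
  | zero => rw [getSubtreeA]
  | succ f =>
    rw [getSubtreeA, h]

-- fuel-synchronised adequacy of A's recursion
theorem lemA (l : List (String × List (String × String)))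
    (hk : (l.map Prod.fst).Nodup) :
    ∀ (f : Nat) (u : String) (n : List (String × String)) (w : String)
      (acc : List (List (String × String))), lk l u = some n → uidOf n = some w →
      getSubtreeA l (childD l) f n acc = acc ++ preV l f w := by
  intro f
  induction f with
  | zero => intro u n w acc h hw; simp [getSubtreeA, preV]
  | succ f ih =>
    intro u n w acc h hw
    have hgo : ∀ (cs : List String) (acc : List (List (String × String))),
        (∀ c ∈ cs, ∃ m, lk l c = some m) →
        goA l (childD l) f cs acc = acc ++ cs.flatMap (pvGV l f) := by
      intro cs
      induction cs with
      | nil => intro acc _; simp [goA]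
      | cons c cs ihc =>
        intro acc hlk
        rcases hlk c (by simp) with ⟨m, hm⟩
        have hm2 : PySem.Dict.get? (PySem.Dict.mk l) c = some m := hm
        have hstep : goA l (childD l) f (c :: cs) acc
            = goA l (childD l) f cs (getSubtreeA l (childD l) f m (acc ++ [m])) := by
          rw [goA, hm2]
        rw [hstep, ihc _ (fun x hx => hlk x (by simp [hx]))]
        cases hum : uidOf m with
        | none =>
          rw [getSubtreeA_uuid_none l _ hum]
          simp [pvGV, lk, hm2, hum]
        | some w2 =>
          rw [ih c m w2 (acc ++ [m]) hm hum]
          simp [pvGV, lk, hm2, hum]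
    rw [getSubtreeA]
    have huid2 : PySem.Dict.get? (PySem.Dict.mk n) "uuid" = some w := hw
    cases hch : PySem.Dict.get? (childD l) w with
    | none =>
      have hnil : childList l w = [] := by
        unfold childList; rw [PySem.Dict.getD_eq_get?_getD, hch]; rfl
      simp [huid2, hch, preV_succ, hnil]
    | some cs =>
      have hcl : childList l w = cs := by
        unfold childList; rw [PySem.Dict.getD_eq_get?_getD, hch]; rfl
      by_cases hemp : cs.isEmpty
      · simp [huid2, hch, preV_succ, hcl, List.isEmpty_iff.mp hemp]
      · have hg2 := hgo cs acc (fun c hc => by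
          rcases (mem_childList l w c).mp (by rw [hcl]; exact hc) with ⟨m, hm, _⟩
          exact ⟨m, lk_mem l hk hm⟩)
        rw [preV_succ, hcl]
        simp only [huid2, hch, hemp, hg2]
        rfl

-- size bound used only to show the iterative port's fuel is ample
theorem preV_size (l : List (String × List (String × String))) :
    ∀ (f : Nat) (w : String), (preV l f w).length + 1 ≤ (l.length + 1) ^ f := by
  intro f
  induction f with
  | zero => intro w; simp [preV]
  | succ f ih =>
    intro w
    rw [preV_succ]
    have h1 : ∀ c ∈ childList l w, (pvGV l f c).length ≤ (l.length + 1) ^ f := by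
      intro c hc
      unfold pvGV
      cases lk l c with
      | none => simp
      | some m =>
        dsimp only
        cases uidOf m with
        | none =>
          simp only [List.length_cons, List.length_nil]
          have := Nat.one_le_pow f (l.length + 1) (by omega)
          omega
        | some w2 =>
          simp only [List.length_cons]
          exact ih w2
    have h2 : ((childList l w).flatMap (pvGV l f)).length
        ≤ (childList l w).length * (l.length + 1) ^ f := by
      rw [List.length_flatMap]
      calc ((childList l w).map (fun c => (pvGV l f c).length)).sum
          ≤ ((childList l w).map (fun _ => (l.length + 1) ^ f)).sum :=
            List.sum_le_sum (fun c hc => h1 c hc)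
        _ = (childList l w).length * (l.length + 1) ^ f := by
            rw [List.map_const', List.sum_replicate, smul_eq_mul]
    have h3 := length_childList l w
    have h4 : 1 ≤ (l.length + 1) ^ f := Nat.one_le_pow _ _ (by omega)
    calc ((childList l w).flatMap (pvGV l f)).length + 1
        ≤ (childList l w).length * (l.length + 1) ^ f + 1 := by omega
      _ ≤ l.length * (l.length + 1) ^ f + (l.length + 1) ^ f := by
          have := Nat.mul_le_mul_right ((l.length + 1) ^ f) h3
          omega
      _ = (l.length + 1) ^ (f + 1) := by ring

-- adequacy of B's stack loop: every stack element is a key of a node with a pvGood uuid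
theorem lemB (l : List (String × List (String × String)))
    (hk : (l.map Prod.fst).Nodup) :
    ∀ (fB : Nat) (stack : List String) (res : List (List (String × String))),
      (∀ c ∈ stack, ∃ m w, lk l c = some m ∧ uidOf m = some w ∧
          pvGood l l.length w = true) →
      (stack.flatMap (pvGV l l.length)).length ≤ fB →
      loopB l (childD l) fB stack res = res ++ stack.flatMap (pvGV l l.length) := by
  intro fB
  induction fB with
  | zero =>
    intro stack res hg hw
    cases stack with
    | nil => simp [loopB]
    | cons c stack =>
      exfalso
      rcases hg c (by simp) with ⟨m, w, hm, _, _⟩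
      simp [List.flatMap_cons, pvGV, hm] at hw
  | succ fB ih =>
    intro stack res hg hw
    cases stack with
    | nil => simp [loopB]
    | cons c stack =>
      rcases hg c (by simp) with ⟨m, w, hm, hum, hgw⟩
      have hm2 : PySem.Dict.get? (PySem.Dict.mk l) c = some m := hm
      have hum2 : PySem.Dict.get? (PySem.Dict.mk m) "uuid" = some w := hum
      have hcm : (c, m) ∈ l := mem_of_lk l hm
      obtain ⟨M, hM⟩ : ∃ M, l.length = M + 1 := by
        have := List.length_pos_of_mem hcm
        exact ⟨l.length - 1, by omega⟩
      -- the popped subtree expands with full fuel thanks to stability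
      have hgu : pvGV l l.length c = m :: (childList l w).flatMap (pvGV l l.length) := by
        unfold pvGV
        rw [hm]
        dsimp only
        rw [hum]
        dsimp only
        rw [preV_stab l hk l.length w l.length hgw (le_refl _), preV_succ]
        exact congrArg (m :: ·) (flatMap_congr_mem _ _ _ (fun c2 _ => rfl))
      have hstep : loopB l (childD l) (fB+1) (c :: stack) res
          = loopB l (childD l) fB (childList l w ++ stack) (res ++ [m]) := by
        rw [loopB]
        simp only [hm2, hum2]
        rfl
      have hg2 : ∀ c2 ∈ childList l w ++ stack,
          ∃ m2 w2, lk l c2 = some m2 ∧ uidOf m2 = some w2 ∧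
            pvGood l l.length w2 = true := by
        intro c2 hc2
        rcases List.mem_append.mp hc2 with hc2 | hc2
        · rcases (mem_childList l w c2).mp hc2 with ⟨m2, hm2b, hp2⟩
          have hgw' : pvGood l (M+1) w = true := by rw [← hM]; exact hgw
          rcases goodChildren l hgw' hm2b hp2 with ⟨w2, hw2, hg3⟩
          exact ⟨m2, w2, lk_mem l hk hm2b, hw2, pvGood_le l (by omega) hg3⟩
        · exact hg c2 (by simp [hc2])
      have hw2 : ((childList l w ++ stack).flatMap (pvGV l l.length)).length ≤ fB := by
        rw [List.flatMap_append, List.length_append]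
        rw [List.flatMap_cons, List.length_append, hgu] at hw
        simp only [List.length_cons] at hw
        omega
      rw [hstep, ih _ _ hg2 hw2]
      simp [hgu, List.flatMap_append]

theorem foldl_congr_mem2 {α β : Type} (l : List α) (f g : β → α → β) (init : β)
    (h : ∀ acc x, x ∈ l → f acc x = g acc x) : l.foldl f init = l.foldl g init := by
  induction l generalizing init with
  | nil => rfl
  | cons x l ih =>
    rw [List.foldl_cons, List.foldl_cons, h init x (by simp)]
    exact ih _ (fun acc y hy => h acc y (by simp [hy]))

theorem mainAB (l : List (String × List (String × String)))
    (hk : (l.map Prod.fst).Nodup)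
    (hR : (l.all (fun kn => match parentF kn.2 with
      | some _ => true
      | none => match uidOf kn.2 with
        | some w => pvGood l l.length w
        | none => false)) = true) :
    tree_sort_database l = tree_sort_database_alt l := by
  unfold tree_sort_database tree_sort_database_alt
  rw [← foldAB]
  refine foldl_congr_mem2 _ _ _ _ (fun acc r hr => ?_)
  have hr2 : r ∈ rootsA l := hr
  rw [rootsA_spec] at hr2
  obtain ⟨⟨k, n⟩, hkn, hsnd⟩ := List.mem_map.mp hr2
  obtain ⟨hmem, hpn⟩ := List.mem_filter.mp hkn
  simp only at hsnd
  subst hsnd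
  have hpn2 : parentF n = none := Option.isNone_iff_eq_none.mp (by simpa using hpn)
  have hroot := (List.all_eq_true.mp hR) (k, n) hmem
  simp only at hroot
  rw [hpn2] at hroot
  obtain ⟨w, hw, hgw⟩ : ∃ w, uidOf n = some w ∧ pvGood l l.length w = true := by
    cases hu : uidOf n with
    | none => rw [hu] at hroot; exact absurd hroot (by simp)
    | some w => rw [hu] at hroot; exact ⟨w, rfl, hroot⟩
  have hlk : lk l k = some n := lk_mem l hk hmem
  have huid : PySem.Dict.get? (PySem.Dict.mk n) "uuid" = some w := hw
  obtain ⟨M, hM⟩ : ∃ M, l.length = M + 1 := by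
    have := List.length_pos_of_mem hmem
    exact ⟨l.length - 1, by omega⟩
  -- A side
  have hA : getSubtreeA l (childD l) (l.length + 1) n [] = preV l (l.length + 1) w := by
    rw [lemA l hk (l.length + 1) k n w [] hlk hw]
    rfl
  -- B side
  have hwB : ((childList l w).flatMap (pvGV l l.length)).length
      ≤ (l.length + 1) ^ (l.length + 1) := by
    rw [← preV_succ]
    have h1 := preV_size l (l.length + 1) w
    omega
  have hB : loopB l (childD l) ((l.length + 1) ^ (l.length + 1))
      (PySem.Dict.getD (childD l) w []) acc
      = acc ++ preV l (l.length + 1) w := by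
    have hcl : PySem.Dict.getD (childD l) w [] = childList l w := rfl
    have hgw' : pvGood l (M+1) w = true := by rw [← hM]; exact hgw
    rw [hcl, lemB l hk _ _ _
      (fun c hc => by
        rcases (mem_childList l w c).mp hc with ⟨m, hm, hp⟩
        rcases goodChildren l hgw' hm hp with ⟨w2, hw2, hg3⟩
        exact ⟨m, w2, lk_mem l hk hm, hw2, pvGood_le l (by omega) hg3⟩) hwB, preV_succ]
  show acc ++ getSubtreeA l (childD l) (l.length + 1) n [] =
    match PySem.Dict.get? (PySem.Dict.mk n) "uuid" with
    | none => acc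
    | some u => loopB l (childD l) ((l.length + 1) ^ (l.length + 1))
        (PySem.Dict.getD (childD l) u []) acc
  rw [huid, hA]
  exact hB.symm

-- ===== VERDICT (by name: the statement is the Claim_ definition above) =====
theorem tree_sort_database_spec : Claim_equal_tree_sort_database := by
  unfold Claim_equal_tree_sort_database
  intro nodes _hdom hpre
  unfold Spec_tree_sort_database
  exact mainAB nodes hpre.1 hpre.2
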